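-- pv_equiv track=rewrite | github.com/mkj3085003/2024DeepLearning | 4/tangshi_for_pytorch/main.py | generate_batch
-- ===== SOURCE A (Python) =====
-- batch_size = 64
--
-- def generate_batch(batch_size, poems_vec, word_to_int):
--     n_chunk = len(poems_vec) // batch_size #生成batch的number
--     x_batches = []
--     y_batches = []
--     for i in range(n_chunk):
--         start_index = i * batch_size
--         end_index = start_index + batch_size
--         x_data = poems_vec[start_index:end_index]
--         y_data = []
--         for row in x_data:
--             y  = row[1:]
--             y.append(row[-1])
--             y_data.append(y)
--         """
--         看下面的例子：x第一个是6，y的第一个是2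
--         就是根据6，来预测下一个‘汉字’2
--         y是x左移一位，最后一位重复【最后两位相同啊==> 9,9  5,5】
--         仔细看看就知道了，上面的代码就是把y处理成这样了。
--         x_data             y_data
--         [6,2,4,6,9]       [2,4,6,9,9]
--         [1,4,2,8,5]       [4,2,8,5,5]
--         """
--
--         x_batches.append(x_data)
--         y_batches.append(y_data)
--     return x_batches, y_batches
-- ===== SOURCE B (Python) =====
-- def generate_batch(batch_size, poems_vec, word_to_int):
--     n_chunk = len(poems_vec) // batch_size
--     if n_chunk <= 0:
--         return [], []
--     limit = n_chunk * batch_size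
--     x_batches, y_batches = [], []
--     for count, row in enumerate(poems_vec):
--         if count == limit:
--             break
--         if count % batch_size == 0:
--             x_batches.append([])
--             y_batches.append([])
--         last = len(row) - 1
--         x_batches[-1].append(row)
--         y_batches[-1].append([row[min(j + 1, last)] for j in range(len(row))])
--     return x_batches, y_batches
-- ===== Notes on version B (the rewrite author's own statement) =====
-- stated objective: alternative
-- what changed: A slices the list into batches with index arithmetic and builds each target row via row[1:]+[row[-1]]; B makes one pass over the rows with a modular counter, starting a fresh batch whenever count % batch_size == 0 and growing the last batch in place, and builds each target row by bounded-lookahead indexing row[min(j+1,last)] instead of slicing.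
import Mathlib
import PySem

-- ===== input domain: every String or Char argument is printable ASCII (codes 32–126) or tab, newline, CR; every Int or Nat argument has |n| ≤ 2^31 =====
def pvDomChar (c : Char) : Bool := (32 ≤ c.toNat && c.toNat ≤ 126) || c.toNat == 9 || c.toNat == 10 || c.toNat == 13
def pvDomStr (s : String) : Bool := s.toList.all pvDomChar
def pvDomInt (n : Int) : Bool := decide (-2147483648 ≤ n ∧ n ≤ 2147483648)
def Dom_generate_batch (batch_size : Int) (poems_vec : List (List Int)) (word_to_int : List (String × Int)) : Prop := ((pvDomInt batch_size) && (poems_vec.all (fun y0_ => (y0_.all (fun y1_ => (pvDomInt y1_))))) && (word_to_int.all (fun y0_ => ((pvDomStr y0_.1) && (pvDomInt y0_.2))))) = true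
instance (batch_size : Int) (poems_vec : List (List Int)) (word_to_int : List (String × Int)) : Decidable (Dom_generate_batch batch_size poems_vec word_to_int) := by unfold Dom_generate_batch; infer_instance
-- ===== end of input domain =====

-- B replaces A's slice-into-batches loop by one flat pass over the rows with a modular counter
-- (a new batch is opened whenever count % batch_size == 0 and the last batch grows in place),
-- and builds each target row by bounded-lookahead indexing instead of slicing (objective: alternative, same cost).

-- ===== PORT A =====
-- literal transliteration of A: outer loop over range(n_chunk), inner loop shifting the rows of each chunk
def generate_batch (batch_size : Int) (poems_vec : List (List Int)) (word_to_int : List (String × Int)) : List (List (List Int)) × List (List (List Int)) :=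
  let n_chunk := PySem.Int.floordiv (poems_vec.length : Int) batch_size
  (PySem.List.pyRange 0 n_chunk 1).foldl
    (fun (acc : List (List (List Int)) × List (List (List Int))) i =>
      let start_index := i * batch_size
      let end_index := start_index + batch_size
      let x_data := PySem.List.slice poems_vec (some start_index) (some end_index)
      let y_data := x_data.foldl
        (fun (y_data : List (List Int)) row =>
          y_data ++ [PySem.List.slice row (some 1) none ++ [PySem.List.pyGetD row (-1) 0]]) []
      (acc.1 ++ [x_data], acc.2 ++ [y_data]))
    ([], [])

-- ===== PORT B =====
-- [row[min(j + 1, last)] for j in range(len(row))] with last = len(row) - 1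
def pvYRow (row : List Int) : List Int :=
  (PySem.List.pyRange 0 (row.length : Int) 1).map
    (fun j => PySem.List.pyGetD row (min (j + 1) ((row.length : Int) - 1)) 0)

-- one iteration of B's loop body; x_batches[-1].append(row) is rendered as dropLast ++ [getLastD [] ++ [row]]
-- (the batch list is never empty when it is accessed: the first iteration has count = 0 and opens a batch)
def pvStepB (bs : Int) (acc : List (List (List Int)) × List (List (List Int))) (p : Int × List Int) : List (List (List Int)) × List (List (List Int)) :=
  let xb := if PySem.Int.mod p.1 bs = 0 then acc.1 ++ [[]] else acc.1
  let yb := if PySem.Int.mod p.1 bs = 0 then acc.2 ++ [[]] else acc.2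
  (xb.dropLast ++ [xb.getLastD [] ++ [p.2]],
   yb.dropLast ++ [yb.getLastD [] ++ [pvYRow p.2]])

def generate_batch_alt (batch_size : Int) (poems_vec : List (List Int)) (word_to_int : List (String × Int)) : List (List (List Int)) × List (List (List Int)) :=
  let n_chunk := PySem.Int.floordiv (poems_vec.length : Int) batch_size
  if n_chunk ≤ 0 then ([], [])
  else
    let limit := n_chunk * batch_size
    -- 'for count, row in enumerate(poems_vec): if count == limit: break' — counts are the positions,
    -- and limit ≤ len(poems_vec) here, so the break is rendered as taking the first limit entries
    ((PySem.List.enumerate poems_vec).take limit.toNat).foldl (pvStepB batch_size) ([], [])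

-- ===== PRECONDITION & SPEC =====
-- Pre_ excludes exactly the inputs where Python A raises: batch_size = 0 (ZeroDivisionError),
-- and an empty row inside the processed prefix poems_vec[:n_chunk*batch_size] (IndexError on row[-1]).
def Pre_generate_batch (batch_size : Int) (poems_vec : List (List Int)) (word_to_int : List (String × Int)) : Prop :=
  batch_size ≠ 0 ∧
    (0 < batch_size →
      ∀ row ∈ poems_vec.take ((PySem.Int.floordiv (poems_vec.length : Int) batch_size * batch_size).toNat),
        row ≠ [])
instance (batch_size : Int) (poems_vec : List (List Int)) (word_to_int : List (String × Int)) : Decidable (Pre_generate_batch batch_size poems_vec word_to_int) := by unfold Pre_generate_batch; infer_instance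

def pvWitness_generate_batch : Int × List (List Int) × (List (String × Int)) :=
  (2, [[1, 2], [3], [4, 5], [6]], [("a", 1)])

def Spec_generate_batch (batch_size : Int) (poems_vec : List (List Int)) (word_to_int : List (String × Int)) (out : List (List (List Int)) × List (List (List Int))) : Prop := out = generate_batch_alt batch_size poems_vec word_to_int
instance (batch_size : Int) (poems_vec : List (List Int)) (word_to_int : List (String × Int)) (out : List (List (List Int)) × List (List (List Int))) : Decidable (Spec_generate_batch batch_size poems_vec word_to_int out) := by unfold Spec_generate_batch; infer_instance

-- ===== CLAIM (what is proved, stated in full; the proofs are below) =====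
def Claim_equal_generate_batch : Prop := ∀ (batch_size : Int) (poems_vec : List (List Int)) (word_to_int : List (String × Int)), Dom_generate_batch batch_size poems_vec word_to_int → Pre_generate_batch batch_size poems_vec word_to_int → Spec_generate_batch batch_size poems_vec word_to_int (generate_batch batch_size poems_vec word_to_int)

-- ===== LEMMAS AND PROOFS =====

theorem pv_fill (B : Nat) :
    ∀ (c : List (List Int)) (k j : Nat) (xs ys : List (List (List Int))) (cur cury : List (List Int)),
      1 ≤ j → j + c.length ≤ B →
      (PySem.List.enumerate c ((k * B + j : Nat) : Int)).foldl (pvStepB (B : Int)) (xs ++ [cur], ys ++ [cury])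
        = (xs ++ [cur ++ c], ys ++ [cury ++ c.map pvYRow]) := by
  intro c
  induction c with
  | nil => intro k j xs ys cur cury h1 h2; simp [PySem.List.enumerate_nil]
  | cons r c ih =>
    intro k j xs ys cur cury h1 h2
    rw [PySem.List.enumerate_cons, List.foldl_cons]
    have hj : (k * B + j) % B = j := by
      rw [Nat.mul_comm, Nat.mul_add_mod]
      exact Nat.mod_eq_of_lt (by simp at h2; omega)
    have hmod : PySem.Int.mod ((k : Int) * B + j) (B : Int) ≠ 0 := by
      have : ((k : Int) * B + j) = ((k * B + j : Nat) : Int) := by push_cast; ring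
      rw [this, PySem.Int.mod_natCast, hj]
      simp; omega
    have hstep : pvStepB (B : Int) (xs ++ [cur], ys ++ [cury]) (((k * B + j : Nat) : Int), r)
        = (xs ++ [cur ++ [r]], ys ++ [cury ++ [pvYRow r]]) := by
      simp [pvStepB, hmod]
      
    rw [hstep]
    have hcast : ((k * B + j : Nat) : Int) + 1 = ((k * B + (j + 1) : Nat) : Int) := by push_cast; ring
    rw [hcast, ih k (j + 1) xs ys (cur ++ [r]) (cury ++ [pvYRow r]) (by omega) (by simp at h2 ⊢; omega)]
    simp

theorem pv_chunks (B : Nat) (hB : 0 < B) :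
    ∀ (N : Nat) (l : List (List Int)) (k : Nat) (xs ys : List (List (List Int))),
      l.length = N * B →
      (PySem.List.enumerate l ((k * B : Nat) : Int)).foldl (pvStepB (B : Int)) (xs, ys)
        = (xs ++ (List.range N).map (fun i => (l.drop (i * B)).take B),
           ys ++ (List.range N).map (fun i => ((l.drop (i * B)).take B).map pvYRow)) := by
  intro N
  induction N with
  | zero =>
    intro l k xs ys hlen
    have : l = [] := List.eq_nil_of_length_eq_zero (by omega)
    simp [this, PySem.List.enumerate_nil]
  | succ N ih =>
    intro l k xs ys hlen
    have hNB : (N + 1) * B = N * B + B := by ring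
    have hBle : B ≤ l.length := by omega
    -- split off the first chunk
    obtain ⟨r, c, hl⟩ : ∃ r c, l.take B = r :: c := by
      have : (l.take B).length = B := by rw [List.length_take]; omega
      cases htb : l.take B with
      | nil => exfalso; rw [htb] at this; simp at this; omega
      | cons r c => exact ⟨r, c, rfl⟩
    have hsplit : l = (r :: c) ++ l.drop B := by rw [← hl, List.take_append_drop]
    have hclen : (r :: c).length = B := by rw [← hl, List.length_take]; omega
    rw [hsplit, PySem.List.enumerate_append, List.foldl_append]
    -- first element of the chunk opens a new batch
    rw [PySem.List.enumerate_cons, List.foldl_cons]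
    have hmod : PySem.Int.mod ((k * B : Nat) : Int) (B : Int) = 0 := by
      rw [PySem.Int.mod_natCast, Nat.mul_mod_left]; simp
    have hstep : pvStepB (B : Int) (xs, ys) (((k * B : Nat) : Int), r)
        = (xs ++ [[r]], ys ++ [[pvYRow r]]) := by
      simp only [pvStepB]
      rw [show ((k * B : Nat) : Int) = (k : Int) * B by push_cast; ring] at hmod ⊢
      simp [hmod]
    rw [hstep]
    -- the rest of the chunk fills that batch
    have hcast1 : ((k * B : Nat) : Int) + 1 = ((k * B + 1 : Nat) : Int) := by push_cast; ring
    rw [hcast1, pv_fill B c k 1 xs ys [r] [pvYRow r] (by omega) (by simp at hclen; omega)]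
    -- remaining chunks by the induction hypothesis
    have hcast2 : ((k * B : Nat) : Int) + ((r :: c).length : Int) = (((k + 1) * B : Nat) : Int) := by
      rw [hclen]; push_cast; ring
    rw [hcast2, ih (l.drop B) (k + 1) _ _ (by rw [List.length_drop]; omega)]
    rw [← hsplit]
    -- assemble: chunk 0 is take B, chunk (i+1) of l is chunk i of drop B
    have hchunk0 : [r] ++ c = l.take B := by rw [hl]; rfl
    have hdrop : ∀ i : Nat, (l.drop B).drop (i * B) = l.drop ((i + 1) * B) := by
      intro i; rw [List.drop_drop]; ring_nf
    rw [List.range_succ_eq_map]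
    simp only [List.map_cons, List.map_map, Nat.zero_mul, List.drop_zero]
    rw [Prod.mk.injEq]
    constructor
    · rw [List.append_assoc, ← hchunk0]
      simp only [List.cons_append, List.nil_append]
      congr 2
      apply List.map_congr_left
      intro i _
      simp [Function.comp, hdrop i]
    · rw [List.append_assoc]
      have : [pvYRow r] ++ c.map pvYRow = (l.take B).map pvYRow := by
        rw [hl]; rfl
      rw [← this]
      simp only [List.cons_append, List.nil_append]
      congr 2
      apply List.map_congr_left
      intro i _
      simp [Function.comp, hdrop i]

def pvAShift (row : List Int) : List Int :=
  PySem.List.slice row (some 1) none ++ [PySem.List.pyGetD row (-1) 0]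

theorem pv_yrow_eq (row : List Int) (h : row ≠ []) : pvYRow row = pvAShift row := by
  have hlen : 0 < row.length := List.length_pos_iff.mpr h
  unfold pvYRow pvAShift
  rw [PySem.List.slice_from_one, PySem.List.pyGetD_neg_one row 0 h,
      PySem.List.pyRange_zero_natCast]
  rw [List.map_map]
  apply List.ext_getElem
  · simp [List.length_tail]; omega
  · intro i hi1 hi2
    simp only [List.getElem_map, List.getElem_range, Function.comp_apply]
    have hmin : min ((i : Int) + 1) ((row.length : Int) - 1)
        = ((min (i + 1) (row.length - 1) : Nat) : Int) := by
      simp at hi1; push_cast; omega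
    rw [hmin, PySem.List.pyGetD_natCast]
    simp at hi1
    by_cases hc : i < row.length - 1
    · have : min (i + 1) (row.length - 1) = i + 1 := by omega
      rw [this, List.getD_eq_getElem _ _ (by omega)]
      rw [List.getElem_append_left (by simp [List.length_tail]; omega)]
      simp [List.getElem_tail]
    · have hie : i = row.length - 1 := by omega
      have : min (i + 1) (row.length - 1) = row.length - 1 := by omega
      rw [this, List.getD_eq_getElem _ _ (by omega)]
      rw [List.getElem_append_right (by simp [List.length_tail]; omega)]
      simp [List.length_tail, List.getLast_eq_getElem, hie]

theorem pv_inner_fold (xd : List (List Int)) :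
    xd.foldl (fun (y_data : List (List Int)) row =>
        y_data ++ [PySem.List.slice row (some 1) none ++ [PySem.List.pyGetD row (-1) 0]]) []
      = xd.map pvAShift := by
  rw [PySem.List.foldl_append_singleton_eq_map]
  simp [pvAShift]

theorem pv_fdiv_nonpos {a b : Int} (ha : 0 ≤ a) (hb : b < 0) : PySem.Int.floordiv a b ≤ 0 := by
  simp only [PySem.Int.floordiv]
  exact Int.fdiv_nonpos_of_nonneg_of_nonpos ha (le_of_lt hb)

theorem pv_slice_take {α : Type} (l : List α) (a b m : Nat) (h : b ≤ m) :
    (List.take (b - a) (List.drop a (l.take m))) = List.take (b - a) (List.drop a l) := by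
  rw [List.drop_take, List.take_take, Nat.min_eq_left (by omega)]

theorem pv_enum_take {α : Type} (xs : List α) (m : Nat) (s : Int) :
    (PySem.List.enumerate xs s).take m = PySem.List.enumerate (xs.take m) s := by
  induction xs generalizing m s with
  | nil => simp [PySem.List.enumerate_nil]
  | cons x xs ih =>
    cases m with
    | zero => simp [PySem.List.enumerate_nil]
    | succ m => simp [PySem.List.enumerate_cons, ih]

-- ===== VERDICT (by name: the statement is the Claim_ definition above) =====
theorem generate_batch_spec : Claim_equal_generate_batch := by
  intro bs pv w _ hpre
  unfold Spec_generate_batch generate_batch generate_batch_alt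

  obtain ⟨hbs, hrows⟩ := hpre
  set n := PySem.Int.floordiv (pv.length : Int) bs with hn
  by_cases hle : n ≤ 0
  · simp [hle, PySem.List.pyRange_one_eq_nil hle]
  · push_neg at hle
    have hbspos : 0 < bs := by
      by_contra hc
      push_neg at hc
      have hneg : bs < 0 := lt_of_le_of_ne hc hbs
      have h0 := pv_fdiv_nonpos (Int.natCast_nonneg pv.length) hneg
      rw [← hn] at h0
      omega
    simp only [if_neg (not_le.mpr hle)]
    set N := n.toNat with hN
    set B := bs.toNat with hB
    have hnN : n = (N : Int) := by omega
    have hbB : bs = (B : Int) := by omega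
    have hBpos : 0 < B := by omega
    have hNpos : 0 < N := by omega
    have hmul_le : n * bs ≤ (pv.length : Int) := by
      have h1 := PySem.Int.floordiv_mul_add_mod (pv.length : Int) bs
      rw [← hn] at h1
      have hmod : 0 ≤ PySem.Int.mod (pv.length : Int) bs := by
        rw [PySem.Int.mod_eq_emod_of_pos hbspos]
        exact Int.emod_nonneg _ (by omega)
      linarith
    have hNB_le : N * B ≤ pv.length := by
      have h2 : ((N * B : Nat) : Int) ≤ (pv.length : Int) := by
        push_cast; rw [← hnN, ← hbB]; exact hmul_le
      exact_mod_cast h2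
    set used := pv.take (N * B) with hused
    have hlen_used : used.length = N * B := List.length_take_of_le hNB_le
    have hlimit : (n * bs).toNat = N * B := by rw [hnN, hbB]; exact_mod_cast rfl
    -- rows of the processed prefix are nonempty
    have hrow_ne : ∀ row ∈ used, row ≠ [] := by
      intro row hr
      apply hrows hbspos
      rw [hlimit]
      exact hr
    have hBside :
        ((PySem.List.enumerate pv 0).take (n * bs).toNat).foldl (pvStepB bs) ([], [])
          = ((List.range N).map (fun i => (used.drop (i * B)).take B),
             (List.range N).map (fun i => ((used.drop (i * B)).take B).map pvYRow)) := by
      rw [hlimit, pv_enum_take, ← hused, hbB]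
      have h0 : (0 : Int) = ((0 * B : Nat) : Int) := by simp
      rw [h0, pv_chunks B hBpos N used 0 [] [] hlen_used]
      simp
    -- A side chunk slices agree with chunks of the prefix
    have hxchunk : ∀ k, k < N →
        PySem.List.slice pv (some ((k : Int) * bs)) (some ((k : Int) * bs + bs))
          = (used.drop (k * B)).take B := by
      intro k hk
      rw [hbB, hused]
      rw [show ((k : Int) * (B : Int)) = ((k * B : Nat) : Int) by push_cast; ring]
      rw [show (((k * B : Nat) : Int) + (B : Int)) = ((k * B + B : Nat) : Int) by push_cast; ring]
      rw [PySem.List.slice_natCast]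
      rw [← pv_slice_take pv (k * B) (k * B + B) (N * B) (by nlinarith)]
      congr 1
      omega
    have hrangeA : PySem.List.pyRange 0 n 1 = List.map (fun k : Nat => (k : Int)) (List.range N) := by
      rw [hnN]; exact PySem.List.pyRange_zero_natCast N
    rw [hrangeA, hBside]
    rw [PySem.List.foldl_prod_mk
      (f := fun (a : List (List (List Int))) i => a ++ [PySem.List.slice pv (some (i * bs)) (some (i * bs + bs))])
      (g := fun (a : List (List (List Int))) i => a ++ [(PySem.List.slice pv (some (i * bs)) (some (i * bs + bs))).foldl
          (fun (y_data : List (List Int)) row =>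
            y_data ++ [PySem.List.slice row (some 1) none ++ [PySem.List.pyGetD row (-1) 0]]) []])]
    rw [PySem.List.foldl_append_singleton_eq_map, PySem.List.foldl_append_singleton_eq_map]
    simp only [List.map_map, List.nil_append]
    rw [Prod.mk.injEq]
    refine ⟨?_, ?_⟩
    · apply List.map_congr_left
      intro k hk
      simp only [Function.comp_apply]
      exact hxchunk k (List.mem_range.mp hk)
    · apply List.map_congr_left
      intro k hk
      simp only [Function.comp_apply]
      rw [pv_inner_fold, hxchunk k (List.mem_range.mp hk)]
      apply List.map_congr_left
      intro row hr
      exact (pv_yrow_eq row (hrow_ne row (List.mem_of_mem_drop (List.mem_of_mem_take hr)))).symm
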